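-- pv_equiv track=rewrite | github.com/diegoespejelfq-bot/Resoluci-n-generalizada-Torres-de-Hanoi | hanoi_final.py | obtener_stack_r
-- ===== SOURCE A (Python) =====
-- def obtener_stack_r(columna):
--     #Identifica el tamaño de la semipila válida stack[r] en el tope."""
--     if not columna: return 0
--     r = 0
--     # Los discos en el tope deben ser {1, 2, ..., r} consecutivos
--     count = 0
--     discos_set = set(columna)
--     for i in range(1, len(columna) + 1):
--         if i in discos_set: count += 1
--         else: break
--
--     # Verificar si están físicamente en el tope
--     actual_stack = 0
--     for d in reversed(columna):
--         if d <= count: actual_stack += 1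
--         else: break
--     return actual_stack
-- ===== SOURCE B (Python) =====
-- def obtener_stack_r(columna):
--     # phase 1: largest r with {1,...,r} present = length of the gap-free prefix
--     # of the sorted distinct positive values
--     count = 0
--     for v in sorted({v for v in columna if v >= 1}):
--         if v != count + 1:
--             break
--         count += 1
--     # phase 2: single forward pass with a reset counter: length of the maximal
--     # trailing run of discs with value <= count
--     run = 0
--     for d in columna:
--         run = run + 1 if d <= count else 0
--     return run
-- ===== Notes on version B (the rewrite author's own statement) =====
-- stated objective: alternative
-- what changed: Phase one probes no presence set: B sorts the distinct positive values and scans them for the first gap; phase two replaces the reversed-iteration-with-break by a single forward pass with a reset counter, and the empty-list guard disappears because both passes are total.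
import Mathlib
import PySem

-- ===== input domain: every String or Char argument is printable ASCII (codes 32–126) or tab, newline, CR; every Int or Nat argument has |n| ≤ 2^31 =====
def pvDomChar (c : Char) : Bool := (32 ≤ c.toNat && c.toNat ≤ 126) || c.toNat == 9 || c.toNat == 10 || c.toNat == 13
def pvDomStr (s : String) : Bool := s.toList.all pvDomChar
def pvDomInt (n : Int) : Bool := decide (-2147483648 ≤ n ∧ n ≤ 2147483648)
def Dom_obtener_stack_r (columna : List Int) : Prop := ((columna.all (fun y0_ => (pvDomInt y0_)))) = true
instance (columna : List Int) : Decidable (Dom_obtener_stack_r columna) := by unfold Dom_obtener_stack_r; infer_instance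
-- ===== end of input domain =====

-- B finds the gap-free prefix of the sorted distinct positive values instead of
-- probing a presence set, and counts the trailing run with one forward reset-counter
-- pass instead of iterating the reversed list with a break (alternative decomposition).

-- ===== PORT A =====
-- for i in range(1, len(columna)+1): if i in discos_set: count += 1 else: break
def aFirstLoop (s : PySem.Set Int) : List Int → Int → Int
  | [], count => count
  | i :: rest, count =>
    if PySem.Set.contains s i then aFirstLoop s rest (count + 1) else count

-- for d in reversed(columna): if d <= count: actual_stack += 1 else: break
def aSecondLoop (count : Int) : List Int → Int → Int
  | [], acc => acc
  | d :: rest, acc => if d ≤ count then aSecondLoop count rest (acc + 1) else acc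

def obtener_stack_r (columna : List Int) : Int :=
  if columna = [] then 0
  else
    let discos_set := PySem.Set.ofList columna
    let count := aFirstLoop discos_set (PySem.List.pyRange 1 ((columna.length : Int) + 1) 1) 0
    aSecondLoop count columna.reverse 0

-- ===== PORT B =====
-- for v in sorted({v for v in columna if v >= 1}): if v != count + 1: break; count += 1
def bWalk : List Int → Int → Int
  | [], count => count
  | v :: rest, count => if v ≠ count + 1 then count else bWalk rest (count + 1)

def obtener_stack_r_alt (columna : List Int) : Int :=
  let distinct := PySem.List.sorted (PySem.Set.ofList (columna.filter (fun v => 1 ≤ v))) (fun x => x) false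
  let count := bWalk distinct 0
  -- run = run + 1 if d <= count else 0, over columna from the front
  columna.foldl (fun run d => if d ≤ count then run + 1 else 0) 0

-- ===== PRECONDITION & SPEC =====
def Spec_obtener_stack_r (columna : List Int) (out : Int) : Prop := out = obtener_stack_r_alt columna
instance (columna : List Int) (out : Int) : Decidable (Spec_obtener_stack_r columna out) := by unfold Spec_obtener_stack_r; infer_instance

-- ===== CLAIM (what is proved, stated in full; the proofs are below) =====
def Claim_equal_obtener_stack_r : Prop := ∀ (columna : List Int), Dom_obtener_stack_r columna → Spec_obtener_stack_r columna (obtener_stack_r columna)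

-- ===== LEMMAS AND PROOFS =====

-- aSecondLoop is affine in its accumulator.
lemma aSecondLoop_acc (count : Int) (l : List Int) (acc : Int) :
    aSecondLoop count l acc = aSecondLoop count l 0 + acc := by
  induction l generalizing acc with
  | nil => simp [aSecondLoop]
  | cons d rest ih =>
    simp only [aSecondLoop]
    by_cases h : d ≤ count
    · rw [if_pos h, if_pos h, ih (0 + 1), ih (acc + 1)]; omega
    · rw [if_neg h, if_neg h]; omega

-- A's reversed break-loop equals B's forward reset-counter fold.
lemma tail_eq (count : Int) (l : List Int) :
    aSecondLoop count l.reverse 0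
      = l.foldl (fun run d => if d ≤ count then run + 1 else 0) 0 := by
  induction l using List.reverseRecOn with
  | nil => rfl
  | append_singleton l d ih =>
    rw [List.reverse_append, List.foldl_append]
    simp only [List.reverse_cons, List.reverse_nil, List.nil_append, List.foldl_cons,
      List.foldl_nil, List.singleton_append, aSecondLoop]
    by_cases h : d ≤ count
    · rw [if_pos h, if_pos h, aSecondLoop_acc, ih]; omega
    · rw [if_neg h, if_neg h]

-- Core: probing s over range (c+1)..<b equals walking the strictly sorted list l of
-- the members of s that are ≥ c+1, provided the range is long enough to cover l.
lemma walk_eq (s : PySem.Set Int) (l : List Int) :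
    ∀ (b c : Int),
      l.Pairwise (· < ·) →
      (∀ j ∈ l, c + 1 ≤ j) →
      (∀ j, c + 1 ≤ j → (PySem.Set.contains s j = true ↔ j ∈ l)) →
      c + 1 + l.length ≤ b →
      aFirstLoop s (PySem.List.pyRange (c + 1) b 1) c = bWalk l c := by
  induction l with
  | nil =>
    intro b c _ _ hmem _
    by_cases hb : c + 1 < b
    · rw [PySem.List.pyRange_one_cons hb]
      have hfalse : PySem.Set.contains s (c + 1) = false := by
        rw [Bool.eq_false_iff]
        intro h; exact (List.not_mem_nil) ((hmem (c + 1) le_rfl).mp h)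
      simp only [aFirstLoop, bWalk, hfalse, Bool.false_eq_true, if_false]
    · rw [PySem.List.pyRange_one_eq_nil (by omega)]
      rfl
  | cons v rest ih =>
    intro b c hpw hlb hmem hlen
    have hlen' : (c + 1) + 1 + (rest.length : Int) ≤ b := by
      simp only [List.length_cons, Nat.cast_add, Nat.cast_one] at hlen; omega
    have hb : c + 1 < b := by
      have h0 : (0 : Int) ≤ (rest.length : Int) := Int.natCast_nonneg _
      omega
    rw [PySem.List.pyRange_one_cons hb]
    have hve : c + 1 ≤ v := hlb v (List.mem_cons_self)
    have hrest_gt : ∀ j ∈ rest, v < j := (List.pairwise_cons.mp hpw).1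
    by_cases hv : v = c + 1
    · subst hv
      have hc : PySem.Set.contains s (c + 1) = true :=
        (hmem (c + 1) le_rfl).mpr (List.mem_cons_self)
      simp only [aFirstLoop, bWalk, hc, if_true, ne_eq, not_true_eq_false, if_false]
      have := ih b (c + 1) (List.pairwise_cons.mp hpw).2
        (by intro j hj; have := hrest_gt j hj; omega)
        (by
          intro j hj
          rw [hmem j (by omega)]
          constructor
          · intro h
            rcases List.mem_cons.mp h with h1 | h1
            · omega
            · exact h1
          · intro h; exact List.mem_cons_of_mem _ h)
        (by omega)
      exact this
    · have hvgt : c + 1 < v := lt_of_le_of_ne hve (fun h => hv h.symm)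
      have hfalse : PySem.Set.contains s (c + 1) = false := by
        rw [Bool.eq_false_iff]
        intro h
        rcases List.mem_cons.mp ((hmem (c + 1) le_rfl).mp h) with h1 | h1
        · omega
        · have := hrest_gt (c + 1) h1; omega
      simp only [aFirstLoop, bWalk, hfalse, Bool.false_eq_true, if_false, ne_eq, hv,
        not_false_eq_true, if_true]

-- ===== VERDICT (by name: the statement is the Claim_ definition above) =====
theorem obtener_stack_r_spec : Claim_equal_obtener_stack_r := by
  intro columna _
  unfold Spec_obtener_stack_r obtener_stack_r obtener_stack_r_alt
  by_cases hnil : columna = []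
  · subst hnil; rfl
  · rw [if_neg hnil]
    show aSecondLoop
        (aFirstLoop (PySem.Set.ofList columna)
          (PySem.List.pyRange 1 ((columna.length : Int) + 1) 1) 0) columna.reverse 0
      = columna.foldl (fun run d =>
          if d ≤ bWalk (PySem.List.sorted (PySem.Set.ofList (columna.filter (fun v => 1 ≤ v)))
            (fun x => x) false) 0 then run + 1 else 0) 0
    have hcount :
        aFirstLoop (PySem.Set.ofList columna)
            (PySem.List.pyRange 1 ((columna.length : Int) + 1) 1) 0
          = bWalk (PySem.List.sorted (PySem.Set.ofList (columna.filter (fun v => 1 ≤ v)))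
              (fun x => x) false) 0 := by
      have := walk_eq (PySem.Set.ofList columna)
        (PySem.List.sorted (PySem.Set.ofList (columna.filter (fun v => 1 ≤ v))) (fun x => x) false)
        ((columna.length : Int) + 1) 0
        (PySem.List.sorted_ofList_pairwise_lt (columna.filter (fun v => 1 ≤ v)))
        (by
          intro j hj
          rw [PySem.List.mem_sorted, PySem.Set.mem_ofList, List.mem_filter] at hj
          simpa using hj.2)
        (by
          intro j hj
          rw [PySem.Set.contains_iff, PySem.Set.mem_ofList,
              PySem.List.mem_sorted, PySem.Set.mem_ofList, List.mem_filter]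
          constructor
          · intro h; exact ⟨h, by simpa using hj⟩
          · intro h; exact h.1)
        (by
          have h1 : (PySem.List.sorted (PySem.Set.ofList (columna.filter (fun v => 1 ≤ v)))
                (fun x => x) false).length
              = (PySem.Set.ofList (columna.filter (fun v => 1 ≤ v))).length :=
            PySem.List.length_sorted _ _ _
          have h2 := PySem.Set.length_ofList_le (columna.filter (fun v => 1 ≤ v))
          have h3 := List.length_filter_le (fun v => decide (1 ≤ v)) columna
          rw [h1]; omega)
      simpa using this
    rw [hcount, tail_eq]
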